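-- pv_equiv track=rewrite | github.com/lucasbravo00/email-classifier-system | src/05_draft_generator.py | _extract_sender_name
-- ===== SOURCE A (Python) =====
-- def _extract_sender_name(email_address: str) -> str:
--     """
--     Try to extract a first name from an email address
--
--     Examples:
--         john.doe@example.com → John
--         sarah_smith@gmail.com → Sarah
--         mike123@outlook.com → (empty, fallback to generic greeting)
--
--     Args:
--         email_address: Client email address
--
--     Returns:
--         Capitalized first name, or empty string if not extractable
--     """
--     if not email_address or "@" not in email_address:
--         return ""
--
--     local_part = email_address.split("@")[0]
--
--     # Try splitting by common separators
--     for separator in [".", "_", "-"]: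
--         if separator in local_part:
--             first_part = local_part.split(separator)[0]
--             if first_part.isalpha():
--                 return first_part.capitalize()
--
--     # If no separator found, use the whole local part only if it's letters
--     if local_part.isalpha():
--         return local_part.capitalize()
--
--     return ""
-- ===== SOURCE B (Python) =====
-- def _extract_sender_name(email_address: str) -> str:
--     # Single left-to-right scan: take the prefix of the local part up to the
--     # first separator ('.', '_' or '-'); it is the name iff it is alphabetic.
--     if not email_address or "@" not in email_address:
--         return ""
--     local_part = email_address.split("@")[0]
--     i = 0
--     while i < len(local_part) and local_part[i] not in "._-":
--         i += 1
--     prefix = local_part[:i]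
--     return prefix.capitalize() if prefix.isalpha() else ""
-- ===== Notes on version B (the rewrite author's own statement) =====
-- stated objective: simpler
-- what changed: Replaces A's priority-ordered loop over three separators (each doing a membership test plus a full split) with a single left-to-right scan that cuts the local part at the first separator and checks that prefix once.
import Mathlib
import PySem

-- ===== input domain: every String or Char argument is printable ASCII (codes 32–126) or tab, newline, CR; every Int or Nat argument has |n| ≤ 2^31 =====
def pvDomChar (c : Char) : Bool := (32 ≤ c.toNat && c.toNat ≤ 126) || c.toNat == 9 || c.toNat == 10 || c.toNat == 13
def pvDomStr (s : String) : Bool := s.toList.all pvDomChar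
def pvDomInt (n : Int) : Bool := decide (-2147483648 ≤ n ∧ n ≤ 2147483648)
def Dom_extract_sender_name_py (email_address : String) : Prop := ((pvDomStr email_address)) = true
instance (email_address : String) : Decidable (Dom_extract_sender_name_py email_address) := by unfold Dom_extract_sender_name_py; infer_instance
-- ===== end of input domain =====

-- B replaces A's three-separator priority loop (a membership test plus a split per separator)
-- by one left-to-right scan of the local part; objective: simpler.

-- str.capitalize(), exact on the ASCII domain (first char upper-cased, the rest lower-cased);
-- shared helper: both Pythons call .capitalize() on their candidate prefix.
def pyCapitalize : List Char → List Char
  | [] => []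
  | c :: rest => PySem.Chars.upperChar c :: rest.map PySem.Chars.lowerChar

-- ===== PORT A =====
def extract_sender_name_py (email_address : String) : String :=
  -- if not email_address or "@" not in email_address: return ""
  if email_address.toList = [] ∨ PySem.Chars.isIn ['@'] email_address.toList = false then ""
  else
    -- local_part = email_address.split("@")[0]   (split(...) is never empty, so [0] = headD)
    let local_part := (PySem.Chars.splitOn email_address.toList ['@']).headD []
    -- for separator in [".", "_", "-"]: … ; early 'return' modelled by an Option accumulator
    let loopRes : Option (List Char) := ['.', '_', '-'].foldl (fun res sep =>
      match res with
      | some r => some r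
      | none =>
        if PySem.Chars.isIn [sep] local_part then
          let first_part := (PySem.Chars.splitOn local_part [sep]).headD []
          if PySem.Chars.strIsalpha first_part then some (pyCapitalize first_part) else none
        else none) none
    match loopRes with
    | some r => String.ofList r
    | none =>
      if PySem.Chars.strIsalpha local_part then String.ofList (pyCapitalize local_part) else ""

-- ===== PORT B =====
-- ch in "._-"
def isSepChar (c : Char) : Bool := c == '.' || c == '_' || c == '-'

-- Source B's while loop: the prefix of the local part before its first separator
def scanPrefix : List Char → List Char
  | [] => []
  | c :: rest => if isSepChar c then [] else c :: scanPrefix rest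

def extract_sender_name_py_alt (email_address : String) : String :=
  if email_address.toList = [] ∨ PySem.Chars.isIn ['@'] email_address.toList = false then ""
  else
    let local_part := (PySem.Chars.splitOn email_address.toList ['@']).headD []
    let pre := scanPrefix local_part
    if PySem.Chars.strIsalpha pre then String.ofList (pyCapitalize pre) else ""

-- ===== PRECONDITION & SPEC =====
def Spec_extract_sender_name_py (email_address : String) (out : String) : Prop := out = extract_sender_name_py_alt email_address
instance (email_address : String) (out : String) : Decidable (Spec_extract_sender_name_py email_address out) := by unfold Spec_extract_sender_name_py; infer_instance

-- ===== CLAIM (what is proved, stated in full; the proofs are below) =====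
def Claim_equal_extract_sender_name_py : Prop := ∀ (email_address : String), Dom_extract_sender_name_py email_address → Spec_extract_sender_name_py email_address (extract_sender_name_py email_address)

-- ===== LEMMAS AND PROOFS =====

-- head of splitOn.go for a one-character separator, fuel-generalized
lemma splitOn_go_head (c : Char) : ∀ (fuel : Nat) (l cur : List Char) (acc : List (List Char)),
    l.length ≤ fuel →
    (PySem.Chars.splitOn.go [c] fuel l cur acc).headD [] =
      acc.reverse.headD (cur.reverse ++ l.takeWhile (fun x => !(x == c))) := by
  intro fuel
  induction fuel with
  | zero =>
    intro l cur acc hl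
    have : l = [] := by simpa using hl
    subst this
    simp [PySem.Chars.splitOn.go]
  | succ n ih =>
    intro l cur acc hl
    cases l with
    | nil => simp [PySem.Chars.splitOn.go]
    | cons x rest =>
      rw [PySem.Chars.splitOn.go]
      by_cases hx : c = x
      · subst hx
        have hpre : [c].isPrefixOf (c :: rest) = true := by simp [List.isPrefixOf]
        simp only [hpre, if_pos]
        rw [ih _ _ _ (by simpa using Nat.le_of_succ_le_succ (by simpa using hl))]
        simp
      · have hpre : [c].isPrefixOf (x :: rest) = false := by
          simp [List.isPrefixOf, hx]
        simp only [hpre, Bool.false_eq_true, if_false]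
        rw [ih _ _ _ (by simpa using hl)]
        have hxc : (x == c) = false := by simp [Ne.symm hx]
        simp [hxc]

-- s.split(c)[0] is the prefix of s before the first c
lemma splitOn_head (c : Char) (l : List Char) :
    (PySem.Chars.splitOn l [c]).headD [] = l.takeWhile (fun x => !(x == c)) := by
  have := splitOn_go_head c (l.length + 1) l [] [] (by omega)
  simpa [PySem.Chars.splitOn] using this

lemma isIn_singleton_of_mem {d : Char} {l : List Char} (h : d ∈ l) :
    PySem.Chars.isIn [d] l = true := by
  rw [PySem.Chars.isIn_iff_infix]
  obtain ⟨l1, l2, rfl⟩ := List.append_of_mem h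
  exact ⟨l1, l2, by simp⟩

-- a string containing a separator is not alphabetic
lemma strIsalpha_append_sep (t u : List Char) {d : Char} (hd : (d == '.' || d == '_' || d == '-') = true) :
    PySem.Chars.strIsalpha (t ++ d :: u) = false := by
  have : PySem.Chars.isalpha d = false := by
    rcases (by simpa using hd : (d = '.' ∨ d = '_') ∨ d = '-') with (h | h) | h <;> subst h <;> decide
  simp [PySem.Chars.strIsalpha, this]

lemma scanPrefix_eq_takeWhile (l : List Char) :
    scanPrefix l = l.takeWhile (fun c => !isSepChar c) := by
  induction l with
  | nil => rfl
  | cons c rest ih => by_cases h : isSepChar c <;> simp [scanPrefix, h, ih]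

-- takeWhile (≠ c) walks through a separator-free prefix when c is a separator
lemma takeWhile_ne_of_all_not_sep {t : List Char} (ht : ∀ x ∈ t, isSepChar x = false)
    {c : Char} (hc : isSepChar c = true) (u : List Char) :
    (t ++ u).takeWhile (fun x => !(x == c)) = t ++ u.takeWhile (fun x => !(x == c)) := by
  induction t with
  | nil => rfl
  | cons a t ih =>
    have ha : (a == c) = false := by
      have := ht a (by simp)
      by_contra hne
      have : a = c := by simpa using (Bool.not_eq_false _).mp hne
      subst this; rw [this] at hc; simp_all
    simp only [List.cons_append, List.takeWhile_cons, ha]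
    simp [ih (fun x hx => ht x (by simp [hx]))]

-- the core: after the shared guard and '@'-split, A's separator loop equals B's scan
lemma core_eq (lp : List Char) :
    (match ['.', '_', '-'].foldl (fun res sep =>
      match res with
      | some r => some r
      | none =>
        if PySem.Chars.isIn [sep] lp then
          let first_part := (PySem.Chars.splitOn lp [sep]).headD []
          if PySem.Chars.strIsalpha first_part then some (pyCapitalize first_part) else none
        else none) (none : Option (List Char)) with
    | some r => String.ofList r
    | none => if PySem.Chars.strIsalpha lp then String.ofList (pyCapitalize lp) else "") =
    (if PySem.Chars.strIsalpha (scanPrefix lp) then String.ofList (pyCapitalize (scanPrefix lp)) else "") := by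
  have hsplit := lp.takeWhile_append_dropWhile (p := fun c => !isSepChar c)
  set t := lp.takeWhile (fun c => !isSepChar c) with hT
  have htall : ∀ x ∈ t, isSepChar x = false := by
    intro x hx
    have := List.mem_takeWhile_imp hx
    simpa using this
  rw [scanPrefix_eq_takeWhile, ← hT]
  cases hdrop : lp.dropWhile (fun c => !isSepChar c) with
  | nil =>
    have hlp : lp = t := by rw [← hsplit, hdrop, List.append_nil]
    have htw : ∀ c : Char, isSepChar c = true → lp.takeWhile (fun x => !(x == c)) = lp := by
      intro c hc
      have := takeWhile_ne_of_all_not_sep (t := t) htall hc []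
      simpa [← hlp] using this
    simp only [List.foldl, splitOn_head]
    rw [htw '.' rfl, htw '_' rfl, htw '-' rfl, ← hlp]
    cases h : PySem.Chars.strIsalpha lp <;>
      cases h1 : PySem.Chars.isIn ['.'] lp <;>
      cases h2 : PySem.Chars.isIn ['_'] lp <;>
      cases h3 : PySem.Chars.isIn ['-'] lp <;>
      simp [h, h1, h2, h3, hlp]
  | cons d rest =>
    have hd : isSepChar d = true := by
      have := List.head_dropWhile_not (p := fun c => !isSepChar c) (l := lp)
      rw [hdrop] at this
      simpa using this (by simp)
    have hlp : lp = t ++ d :: rest := by rw [← hsplit, hdrop]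
    have htw : ∀ c : Char, isSepChar c = true →
        lp.takeWhile (fun x => !(x == c)) = t ++ (d :: rest).takeWhile (fun x => !(x == c)) := by
      intro c hc
      rw [hlp]; exact takeWhile_ne_of_all_not_sep htall hc _
    have hlp_alpha : PySem.Chars.strIsalpha lp = false := by
      rw [hlp]; exact strIsalpha_append_sep _ _ (by simpa [isSepChar] using hd)
    have hmem : d ∈ lp := by rw [hlp]; simp
    simp only [List.foldl, splitOn_head]
    have h_eq : lp.takeWhile (fun x => !(x == d)) = t := by
      rw [htw d hd]; simp [List.takeWhile_cons]
    have h_ne : ∀ c : Char, isSepChar c = true → d ≠ c →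
        PySem.Chars.strIsalpha (lp.takeWhile (fun x => !(x == c))) = false := by
      intro c hc hdc
      rw [htw c hc]
      have hdc' : (d == c) = false := by simpa using hdc
      simp only [List.takeWhile_cons, hdc', Bool.not_false, if_true]
      exact strIsalpha_append_sep _ _ (by simpa [isSepChar] using hd)
    rcases (by simpa [isSepChar] using hd : (d = '.' ∨ d = '_') ∨ d = '-') with (h | h) | h <;> subst h
    · rw [isIn_singleton_of_mem hmem, h_eq]
      have n2 := h_ne '_' rfl (by decide)
      have n3 := h_ne '-' rfl (by decide)
      cases h : PySem.Chars.strIsalpha t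
      · cases h2 : PySem.Chars.isIn ['_'] lp <;> cases h3 : PySem.Chars.isIn ['-'] lp <;>
          simp [h, h2, h3, n2, n3, hlp_alpha]
      · simp [h]
    · rw [isIn_singleton_of_mem hmem, h_eq]
      have n1 := h_ne '.' rfl (by decide)
      have n3 := h_ne '-' rfl (by decide)
      cases h : PySem.Chars.strIsalpha t
      · cases h1 : PySem.Chars.isIn ['.'] lp <;> cases h3 : PySem.Chars.isIn ['-'] lp <;>
          simp [h, h1, h3, n1, n3, hlp_alpha]
      · cases h1 : PySem.Chars.isIn ['.'] lp <;> simp [h, h1, n1]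
    · rw [isIn_singleton_of_mem hmem, h_eq]
      have n1 := h_ne '.' rfl (by decide)
      have n2 := h_ne '_' rfl (by decide)
      cases h : PySem.Chars.strIsalpha t
      · cases h1 : PySem.Chars.isIn ['.'] lp <;> cases h2 : PySem.Chars.isIn ['_'] lp <;>
          simp [h, h1, h2, n1, n2, hlp_alpha]
      · cases h1 : PySem.Chars.isIn ['.'] lp <;> cases h2 : PySem.Chars.isIn ['_'] lp <;>
          simp [h, h1, h2, n1, n2]

-- ===== VERDICT (by name: the statement is the Claim_ definition above) =====
theorem extract_sender_name_py_spec : Claim_equal_extract_sender_name_py := by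
  intro email_address _
  unfold Spec_extract_sender_name_py extract_sender_name_py extract_sender_name_py_alt
  by_cases h : email_address.toList = [] ∨ PySem.Chars.isIn ['@'] email_address.toList = false
  · simp only [if_pos h]
  · simp only [if_neg h]
    exact core_eq _
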